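-- pv_equiv track=rewrite | github.com/NicklasVrede/PETs-Crawler---Speciale | analysis/cookies/cookie_identifiers_by_rank.py | get_rank_bucket_label
-- ===== SOURCE A (Python) =====
-- RANK_BUCKETS = [
--     (1, 5000),           # [1-5k]
--     (5001, 10000),       # [5k-10k]
--     (10001, 50000),      # [10k-50k]
--     (50001, 250000),     # [50k-250k]
--     (250001, 500000),    # [250k-500k]
--     (500001, 1000000),   # [500k-1M]
-- ]
--
-- def get_rank_bucket_label(rank):
--     """Convert a rank to a bucket label"""
--     for start, end in RANK_BUCKETS:
--         if start <= rank <= end: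
--             if start < 1000:
--                 start_label = str(start)
--             else:
--                 start_label = f"{start//1000}k"
--             if end < 1000:
--                 end_label = str(end)
--             else:
--                 end_label = f"{end//1000}k"
--             return f"[{start_label}-{end_label}]"
--     return "unknown"
-- ===== SOURCE B (Python) =====
-- import bisect
--
-- _BOUNDS = [5000, 10000, 50000, 250000, 500000, 1000000]
-- _LABELS = ['[1-5k]', '[5k-10k]', '[10k-50k]', '[50k-250k]', '[250k-500k]', '[500k-1000k]']
--
-- def get_rank_bucket_label(rank):
--     if rank < 1 or rank > 1000000:
--         return "unknown"
--     return _LABELS[bisect.bisect_left(_BOUNDS, rank)]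
-- ===== Notes on version B (the rewrite author's own statement) =====
-- stated objective: simpler
-- what changed: Replaces the linear scan over (start,end) pairs with per-bucket label formatting by a range check plus bisect into a precomputed list of bucket upper bounds and fixed label strings.
import Mathlib
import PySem

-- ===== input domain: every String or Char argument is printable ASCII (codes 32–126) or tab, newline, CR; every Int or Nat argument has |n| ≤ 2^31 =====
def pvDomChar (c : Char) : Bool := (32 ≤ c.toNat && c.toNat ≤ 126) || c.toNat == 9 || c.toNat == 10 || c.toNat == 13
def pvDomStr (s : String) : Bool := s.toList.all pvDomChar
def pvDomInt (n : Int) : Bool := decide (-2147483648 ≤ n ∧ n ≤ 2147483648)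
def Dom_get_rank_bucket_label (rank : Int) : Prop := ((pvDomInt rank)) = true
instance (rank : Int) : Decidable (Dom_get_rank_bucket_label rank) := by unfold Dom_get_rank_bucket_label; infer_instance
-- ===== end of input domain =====

-- ===== PORT A ===== (B replaces A's linear scan+formatting by a range check and a bisect lookup into precomputed labels; simpler)
def pvRankBuckets : List (Int × Int) :=
  [(1, 5000), (5001, 10000), (10001, 50000), (50001, 250000), (250001, 500000), (500001, 1000000)]

def pvBucketLabel (s e : Int) : String :=
  let start_label := if s < 1000 then PySem.Int.toStr s else PySem.Int.toStr (PySem.Int.floordiv s 1000) ++ "k"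
  let end_label := if e < 1000 then PySem.Int.toStr e else PySem.Int.toStr (PySem.Int.floordiv e 1000) ++ "k"
  "[" ++ start_label ++ "-" ++ end_label ++ "]"

def pvLoopA : List (Int × Int) → Int → String
  | [], _ => "unknown"
  | (s, e) :: rest, rank => if s ≤ rank ∧ rank ≤ e then pvBucketLabel s e else pvLoopA rest rank

def get_rank_bucket_label (rank : Int) : String := pvLoopA pvRankBuckets rank

-- ===== PORT B =====
def pvBounds : List Int := [5000, 10000, 50000, 250000, 500000, 1000000]
def pvLabels : List String := ["[1-5k]", "[5k-10k]", "[10k-50k]", "[50k-250k]", "[250k-500k]", "[500k-1000k]"]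

-- bisect.bisect_left on a sorted list = length of the prefix of elements < rank
def get_rank_bucket_label_alt (rank : Int) : String :=
  if rank < 1 ∨ rank > 1000000 then "unknown"
  else ((PySem.List.pyGet? pvLabels (Int.ofNat (pvBounds.takeWhile (fun b => b < rank)).length)).getD "unknown")

-- ===== PRECONDITION & SPEC =====
def Spec_get_rank_bucket_label (rank : Int) (out : String) : Prop := out = get_rank_bucket_label_alt rank
instance (rank : Int) (out : String) : Decidable (Spec_get_rank_bucket_label rank out) := by unfold Spec_get_rank_bucket_label; infer_instance

-- ===== CLAIM (what is proved, stated in full; the proofs are below) =====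
def Claim_equal_get_rank_bucket_label : Prop := ∀ (rank : Int), Dom_get_rank_bucket_label rank → Spec_get_rank_bucket_label rank (get_rank_bucket_label rank)

-- ===== LEMMAS AND PROOFS =====

-- ===== VERDICT (by name: the statement is the Claim_ definition above) =====
set_option maxHeartbeats 2000000 in
theorem get_rank_bucket_label_spec : Claim_equal_get_rank_bucket_label := by
  intro rank _
  unfold Spec_get_rank_bucket_label get_rank_bucket_label get_rank_bucket_label_alt pvLoopA pvRankBuckets pvBounds pvLabels
  simp only [List.takeWhile_cons, List.takeWhile_nil, pvLoopA, pvBucketLabel, decide_eq_true_eq]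
  split_ifs <;> first | omega | decide
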